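-- pv_equiv track=rewrite | github.com/tloula/advent-of-code | day-14.py | gen_mask_perms
-- ===== SOURCE A (Python) =====
-- def gen_mask_perms(mask):
--     perms = list(list(bin(x)[2:]) for x in range(2**mask.count('X')))       # Generate list of permutations
--     perms = [[int(x) for x in perm] for perm in perms]                      # Convert chars to ints
--     perms = [[0] * (len(max(perms)) - len(perm)) + perm for perm in perms]  # Prepend 0's
--     masks = list()
--     for perm in perms:
--         mask_list = list(mask)
--         for i, bit in enumerate(mask_list):
--             if bit == 'X': mask_list[i] = perm.pop(0)
--         masks.append("".join([str(x) for x in mask_list]))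
--     return masks
-- ===== SOURCE B (Python) =====
-- def gen_mask_perms(mask):
--     results = ['']
--     for c in reversed(mask):
--         if c == 'X':
--             results = ['0' + r for r in results] + ['1' + r for r in results]
--         else:
--             results = [c + r for r in results]
--     return results
-- ===== Notes on version B (the rewrite author's own statement) =====
-- stated objective: simpler
-- what changed: Replaces binary counting over range(2**k) with bin()/int() digit conversion, lexicographic-max zero-padding and a pop-based substitution pass by a single right-to-left fold over the mask that doubles the result list at each wildcard position, assembling the output strings directly.
import Mathlib
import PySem

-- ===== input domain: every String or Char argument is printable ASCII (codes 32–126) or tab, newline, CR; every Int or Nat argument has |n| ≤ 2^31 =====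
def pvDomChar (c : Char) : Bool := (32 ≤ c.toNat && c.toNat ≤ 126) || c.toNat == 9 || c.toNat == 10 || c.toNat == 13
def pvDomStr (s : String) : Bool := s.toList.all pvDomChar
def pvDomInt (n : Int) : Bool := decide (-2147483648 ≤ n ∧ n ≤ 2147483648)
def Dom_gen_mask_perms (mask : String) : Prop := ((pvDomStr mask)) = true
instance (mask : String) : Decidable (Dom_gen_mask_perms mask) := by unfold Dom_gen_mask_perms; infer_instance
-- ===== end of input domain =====

-- B replaces A's binary-counting pipeline (range(2**k), bin()/int() conversion, lexicographic-max
-- zero-padding, pop-based substitution) by a direct recursion over the mask that branches '0'/'1' at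
-- each X and assembles the output strings directly: simpler, same output on every input.


-- ===== PORT A =====
-- bin(x)[2:]: Python's bin minus its '0b' prefix, exact for every x ≥ 0 (all x range() yields here).
def pvBinCore (x : Nat) : List Char :=
  if h : x < 2 then [if x = 1 then '1' else '0']
  else pvBinCore (x / 2) ++ [if x % 2 = 1 then '1' else '0']
  decreasing_by exact Nat.div_lt_self (by omega) (by norm_num)

-- Python's list.__gt__ on lists of ints (elementwise comparison, then by length).
def pvListGt : List Int → List Int → Bool
  | _ :: _, [] => true
  | [], _ => false
  | a :: as, b :: bs => if a > b then true else if b > a then false else pvListGt as bs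

-- max(perms): Python raises on an empty list, unreachable here (perms has 2^k ≥ 1 elements).
def pvPyMax (l : List (List Int)) : List Int :=
  match l with
  | [] => []
  | h :: t => t.foldl (fun acc y => if pvListGt y acc then y else acc) h

-- the 'for i, bit in enumerate(mask_list): if bit == 'X': mask_list[i] = perm.pop(0)' loop: each cell
-- keeps its char or takes the next int popped from the front of perm.  perm.pop(0) on an exhausted
-- perm would raise in Python, unreachable here (perm always has one entry per 'X'); headD/tail
-- renders exactly that pop.
def pvSubstLoop : List Char → List Int → List (Char ⊕ Int)
  | [], _ => []
  | c :: cs, p =>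
    if c = 'X' then Sum.inr (p.headD 0) :: pvSubstLoop cs p.tail
    else Sum.inl c :: pvSubstLoop cs p

-- str(x) inside the join: a str element is itself, an int element prints via str().
def pvPieceStr : Char ⊕ Int → String
  | .inl c => String.ofList [c]
  | .inr n => PySem.Int.toStr n

def gen_mask_perms (mask : String) : List String :=
  -- perms = list(list(bin(x)[2:]) for x in range(2**mask.count('X')))   (every x here is ≥ 0)
  let perms1 := (PySem.List.pyRange 0 ((2 : Int) ^ (PySem.Str.count mask "X")) 1).map
    (fun x => pvBinCore x.toNat)
  -- perms = [[int(x) for x in perm] for perm in perms]   (the digits '0'/'1' always parse)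
  let perms2 := perms1.map (fun perm => perm.map (fun ch => (PySem.Int.ofStr? (String.ofList [ch])).getD 0))
  -- perms = [[0] * (len(max(perms)) - len(perm)) + perm for perm in perms]
  let perms3 := perms2.map (fun perm => List.replicate ((pvPyMax perms2).length - perm.length) 0 ++ perm)
  -- for perm in perms: … masks.append("".join([str(x) for x in mask_list]))
  perms3.foldl (fun masks perm =>
    masks ++ [PySem.Str.join "" ((pvSubstLoop mask.toList perm).map pvPieceStr)]) []

-- ===== PORT B =====

def gen_mask_perms_alt (mask : String) : List String :=
  (mask.toList.reverse.foldl (fun results c =>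
    if c = 'X' then results.map (fun r => '0' :: r) ++ results.map (fun r => '1' :: r)
    else results.map (fun r => c :: r)) [[]]).map String.ofList

-- ===== PRECONDITION & SPEC =====
def Spec_gen_mask_perms (mask : String) (out : List String) : Prop := out = gen_mask_perms_alt mask
instance (mask : String) (out : List String) : Decidable (Spec_gen_mask_perms mask out) := by unfold Spec_gen_mask_perms; infer_instance

-- ===== CLAIM (what is proved, stated in full; the proofs are below) =====
def Claim_equal_gen_mask_perms : Prop := ∀ (mask : String), Dom_gen_mask_perms mask → Spec_gen_mask_perms mask (gen_mask_perms mask)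

-- ===== LEMMAS AND PROOFS =====

def pvAltRec : List Char → List (List Char)
  | [] => [[]]
  | c :: cs =>
    let rest := pvAltRec cs
    if c = 'X' then rest.map (fun r => '0' :: r) ++ rest.map (fun r => '1' :: r)
    else rest.map (fun r => c :: r)

theorem pvAltRec_foldl : ∀ (cs : List Char),
    cs.reverse.foldl (fun results c =>
      if c = 'X' then results.map (fun r => '0' :: r) ++ results.map (fun r => '1' :: r)
      else results.map (fun r => c :: r)) [[]] = pvAltRec cs := by
  intro cs
  induction cs with
  | nil => rfl
  | cons c cs ih =>
    rw [List.reverse_cons, List.foldl_append, ih]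
    rfl

-- the k-bit big-endian binary digits of x (least-significant bit appended last)
def pvBits : Nat → Nat → List Int
  | 0, _ => []
  | k + 1, x => pvBits k (x / 2) ++ [((x % 2 : Nat) : Int)]

-- the substituted mask as chars, consuming one bit of the list at each 'X'
def pvSubst : List Char → List Int → List Char
  | [], _ => []
  | c :: cs, p =>
    if c = 'X' then (if p.headD 0 = 1 then '1' else '0') :: pvSubst cs p.tail
    else c :: pvSubst cs p
def pvBinInts (x : Nat) : List Int :=
  (pvBinCore x).map (fun ch => (PySem.Int.ofStr? (String.ofList [ch])).getD 0)

theorem pvBinInts_lt_two {x : Nat} (h : x < 2) : pvBinInts x = [(x : Int)] := by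
  unfold pvBinInts
  rw [pvBinCore, dif_pos h]
  interval_cases x <;> decide

theorem pvBinInts_ge_two {x : Nat} (h : 2 ≤ x) :
    pvBinInts x = pvBinInts (x / 2) ++ [((x % 2 : Nat) : Int)] := by
  unfold pvBinInts
  rw [pvBinCore, dif_neg (by omega : ¬ x < 2), List.map_append]
  congr 1
  rcases Nat.mod_two_eq_zero_or_one x with h2 | h2 <;> rw [h2] <;> decide

theorem pvBinInts_length_le : ∀ (k x : Nat), 1 ≤ k → x < 2 ^ k → (pvBinInts x).length ≤ k := by
  intro k
  induction k with
  | zero => omega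
  | succ k ih =>
    intro x _ hx
    by_cases h2 : x < 2
    · rw [pvBinInts_lt_two h2]; simp
    · rw [pvBinInts_ge_two (by omega)]
      have hk : 1 ≤ k := by
        by_contra hk
        have : k = 0 := by omega
        subst this; simp at hx; omega
      have hxk : x / 2 < 2 ^ k := by
        have h2k : 2 ^ (k+1) = 2 ^ k * 2 := by ring
        omega
      have := ih (x / 2) hk hxk
      simp [List.length_append]
      omega

theorem pvBinInts_bits : ∀ (x : Nat), ∀ b ∈ pvBinInts x, b = 0 ∨ b = 1 := by
  intro x
  induction x using Nat.strong_induction_on with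
  | _ x ih =>
    intro b hb
    by_cases h2 : x < 2
    · rw [pvBinInts_lt_two h2] at hb
      simp at hb; omega
    · rw [pvBinInts_ge_two (by omega)] at hb
      simp at hb
      rcases hb with hb | hb
      · exact ih (x / 2) (Nat.div_lt_self (by omega) (by norm_num)) b hb
      · subst hb; omega

theorem pvBinInts_all_ones : ∀ (k : Nat), 1 ≤ k → pvBinInts (2 ^ k - 1) = List.replicate k 1 := by
  intro k
  induction k with
  | zero => omega
  | succ k ih =>
    intro _
    by_cases hk : k = 0
    · subst hk; rw [pvBinInts_lt_two (by norm_num)]; decide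
    · have hk1 : 1 ≤ k := by omega
      have hp : 2 ^ (k+1) = 2 * 2 ^ k := by ring
      have hge : 2 ≤ 2 ^ k := by
        calc 2 = 2 ^ 1 := by norm_num
        _ ≤ 2 ^ k := Nat.pow_le_pow_right (by norm_num) hk1
      rw [pvBinInts_ge_two (by omega)]
      have hdiv : (2 ^ (k+1) - 1) / 2 = 2 ^ k - 1 := by omega
      have hmod : (2 ^ (k+1) - 1) % 2 = 1 := by omega
      rw [hdiv, hmod, ih hk1]
      rw [List.replicate_succ']
      norm_num

theorem pvBits_zero (k : Nat) : pvBits k 0 = List.replicate k 0 := by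
  induction k with
  | zero => rfl
  | succ k ih => simp [pvBits, ih, List.replicate_succ']

theorem pvBits_cons : ∀ (k x : Nat), pvBits (k + 1) x = ((x / 2 ^ k % 2 : Nat) : Int) :: pvBits k x := by
  intro k
  induction k with
  | zero =>
    intro x
    show pvBits 0 (x / 2) ++ [((x % 2 : Nat) : Int)] = _
    simp [pvBits]
  | succ k ih =>
    intro x
    show pvBits (k+1) (x / 2) ++ _ = _
    rw [ih (x / 2)]
    have : x / 2 / 2 ^ k = x / 2 ^ (k+1) := by
      rw [Nat.div_div_eq_div_mul]
      congr 1
      ring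
    rw [this]
    show _ = _ :: (pvBits k (x / 2) ++ _)
    simp

theorem pvBits_add_pow : ∀ (k x : Nat), pvBits k (x + 2 ^ k) = pvBits k x := by
  intro k
  induction k with
  | zero => intro x; rfl
  | succ k ih =>
    intro x
    show pvBits k ((x + 2 ^ (k+1)) / 2) ++ [(((x + 2 ^ (k+1)) % 2 : Nat) : Int)] = _
    have hp : 2 ^ (k+1) = 2 * 2 ^ k := by ring
    have hdiv : (x + 2 ^ (k+1)) / 2 = x / 2 + 2 ^ k := by omega
    have hmod : (x + 2 ^ (k+1)) % 2 = x % 2 := by omega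
    rw [hdiv, hmod, ih]
    rfl


theorem pvPad_eq_bits : ∀ (k : Nat), 1 ≤ k → ∀ x < 2 ^ k,
    List.replicate (k - (pvBinInts x).length) 0 ++ pvBinInts x = pvBits k x := by
  intro k
  induction k with
  | zero => omega
  | succ k ih =>
    intro _ x hx
    by_cases h2 : x < 2
    · rw [pvBinInts_lt_two h2]
      show _ = pvBits k (x / 2) ++ [((x % 2 : Nat) : Int)]
      have hd : x / 2 = 0 := by omega
      have hm : x % 2 = x := by omega
      rw [hd, hm, pvBits_zero]
      simp
    · have hk1 : 1 ≤ k := by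
        by_contra hk
        have : k = 0 := by omega
        subst this; simp at hx; omega
      rw [pvBinInts_ge_two (by omega)]
      have hxk : x / 2 < 2 ^ k := by
        have h2k : 2 ^ (k+1) = 2 ^ k * 2 := by ring
        omega
      have hlen := pvBinInts_length_le k (x / 2) hk1 hxk
      show _ = pvBits k (x / 2) ++ _
      rw [← ih hk1 (x / 2) hxk]
      have hL : k + 1 - ((pvBinInts (x / 2)).length + 1) = k - (pvBinInts (x / 2)).length := by omega
      simp only [List.length_append, List.length_singleton, hL, List.append_assoc]

theorem pvListGt_irrefl : ∀ (l : List Int), pvListGt l l = false := by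
  intro l
  induction l with
  | nil => rfl
  | cons a as ih => simp [pvListGt, ih]

theorem pvListGt_asymm : ∀ (u v : List Int), pvListGt u v = true → pvListGt v u = false := by
  intro u
  induction u with
  | nil => intro v h; cases v <;> simp [pvListGt] at h
  | cons a as ih =>
    intro v h
    cases v with
    | nil => rfl
    | cons b bs =>
      simp only [pvListGt] at h ⊢
      by_cases hab : a > b
      · rw [if_neg (by omega : ¬ b > a), if_pos hab]
      · rw [if_neg hab] at h
        by_cases hba : b > a
        · rw [if_pos hba] at h; simp at h
        · rw [if_neg hba] at h
          rw [if_neg hba, if_neg hab]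
          exact ih bs h

theorem pvListGt_ones : ∀ (v : List Int) (k : Nat), (∀ b ∈ v, b = 0 ∨ b = 1) →
    v.length ≤ k → v ≠ List.replicate k 1 → pvListGt (List.replicate k 1) v = true := by
  intro v
  induction v with
  | nil =>
    intro k _ _ hne
    cases k with
    | zero => simp at hne
    | succ k => simp [List.replicate_succ, pvListGt]
  | cons b bs ih =>
    intro k hbits hlen hne
    cases k with
    | zero => simp at hlen
    | succ k =>
      rw [List.replicate_succ]
      simp only [pvListGt]
      rcases hbits b (by simp) with hb | hb
      · rw [hb]; norm_num
      · subst hb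
        rw [if_neg (by omega), if_neg (by omega)]
        apply ih k (fun x hx => hbits x (by simp [hx])) (by simp at hlen; omega)
        intro hEq
        exact hne (by rw [List.replicate_succ, hEq])

theorem pvFoldlMax_eq (m : List Int) : ∀ (l : List (List Int)) (a : List Int),
    (∀ y ∈ l, y = m ∨ pvListGt m y = true) → (a = m ∨ pvListGt m a = true) → (m ∈ l ∨ a = m) →
    l.foldl (fun acc y => if pvListGt y acc then y else acc) a = m := by
  intro l
  induction l with
  | nil =>
    intro a _ _ hmem
    simp at hmem ⊢
    tauto
  | cons b bs ih =>
    intro a hdom ha hmem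
    simp only [List.foldl_cons]
    by_cases hbm : b = m
    · subst hbm
      have hacc : (if pvListGt b a = true then b else a) = b := by
        rcases ha with ha | ha
        · rw [ha, pvListGt_irrefl]; simp
        · rw [if_pos ha]
      rw [hacc]
      exact ih b (fun y hy => hdom y (by simp [hy])) (Or.inl rfl) (Or.inr rfl)
    · have hgb : pvListGt m b = true := by
        rcases hdom b (by simp) with h' | h'
        · exact absurd h' hbm
        · exact h'
      by_cases hma : a = m
      · have hc : pvListGt b a = false := by rw [hma]; exact pvListGt_asymm m b hgb
        rw [hc]
        simp only [Bool.false_eq_true, if_false]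
        rw [hma]
        exact ih m (fun y hy => hdom y (by simp [hy])) (Or.inl rfl) (Or.inr rfl)
      · have ha' : pvListGt m a = true := by
          rcases ha with h' | h'
          · exact absurd h' hma
          · exact h'
        have hmem' : m ∈ bs := by
          rcases hmem with hm | hm
          · rcases List.mem_cons.mp hm with hmb | h'
            · exact absurd hmb.symm hbm
            · exact h'
          · exact absurd hm hma
        by_cases hb : pvListGt b a = true
        · rw [if_pos hb]
          exact ih b (fun y hy => hdom y (by simp [hy])) (Or.inr hgb) (Or.inl hmem')
        · rw [if_neg hb]
          exact ih a (fun y hy => hdom y (by simp [hy])) (Or.inr ha') (Or.inl hmem')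

theorem pvPyMax_eq (k : Nat) (hk : 1 ≤ k) :
    pvPyMax ((List.range (2 ^ k)).map pvBinInts) = List.replicate k 1 := by
  have h1 : 1 ≤ 2 ^ k := Nat.one_le_two_pow
  have hdom : ∀ y ∈ (List.range (2 ^ k)).map pvBinInts, y = List.replicate k 1 ∨
      pvListGt (List.replicate k 1) y = true := by
    intro y hy
    simp only [List.mem_map, List.mem_range] at hy
    obtain ⟨x, hx, rfl⟩ := hy
    by_cases he : pvBinInts x = List.replicate k 1
    · exact Or.inl he
    · exact Or.inr (pvListGt_ones _ k (pvBinInts_bits x) (pvBinInts_length_le k x hk hx) he)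
  have hmem : List.replicate k 1 ∈ (List.range (2 ^ k)).map pvBinInts := by
    rw [← pvBinInts_all_ones k hk]
    exact List.mem_map_of_mem (by
      rw [List.mem_range]
      exact Nat.sub_lt (by positivity) one_pos)
  rcases hl : (List.range (2 ^ k)).map pvBinInts with _ | ⟨h, t⟩
  · rw [hl] at hmem; simp at hmem
  · rw [hl] at hmem hdom
    unfold pvPyMax
    rcases List.mem_cons.mp hmem with he | hmt
    · exact pvFoldlMax_eq _ t h (fun y hy => hdom y (by simp [hy])) (Or.inl he.symm) (Or.inr he.symm)
    · exact pvFoldlMax_eq _ t h (fun y hy => hdom y (by simp [hy])) (hdom h (by simp)) (Or.inl hmt)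

theorem pvCount_go_singleton (c : Char) :
    ∀ (l : List Char) (acc : Nat), PySem.Chars.count.go [c] l.length l acc = acc + l.count c := by
  intro l
  induction l with
  | nil => intro acc; simp [PySem.Chars.count.go]
  | cons h t ih =>
    intro acc
    rw [List.length_cons, PySem.Chars.count.go]
    by_cases hc : h = c
    · subst hc
      rw [if_pos (by simp [List.isPrefixOf])]
      simp only [List.length_singleton, List.drop_one, List.tail_cons]
      rw [ih]
      simp
      omega
    · rw [if_neg (by simp [List.isPrefixOf, beq_iff_eq]; exact fun hh => hc hh.symm)]
      rw [ih]
      simp [hc]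

theorem pvStrCountX (mask : String) :
    PySem.Str.count mask "X" = mask.toList.count 'X' := by
  rw [PySem.Str.count_eq]
  show PySem.Chars.count mask.toList ['X'] = _
  unfold PySem.Chars.count
  rw [if_neg (by simp)]
  rw [pvCount_go_singleton]
  simp

theorem pvJoin_flatten : ∀ (ps : List (List Char)), PySem.Chars.join [] ps = ps.flatten := by
  intro ps
  induction ps with
  | nil => simp [PySem.Chars.join_nil]
  | cons p rest ih =>
    cases rest with
    | nil => simp [PySem.Chars.join_singleton]
    | cons q rest' =>
      rw [PySem.Chars.join_cons_cons, ih]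
      simp

theorem pvJoinSubst : ∀ (cs : List Char) (p : List Int), (∀ b ∈ p, b = 0 ∨ b = 1) →
    PySem.Str.join "" ((pvSubstLoop cs p).map pvPieceStr) = String.ofList (pvSubst cs p) := by
  have key : ∀ (cs : List Char) (p : List Int), (∀ b ∈ p, b = 0 ∨ b = 1) →
      (((pvSubstLoop cs p).map pvPieceStr).map String.toList).flatten = pvSubst cs p := by
    intro cs
    induction cs with
    | nil => intro p _; rfl
    | cons c cs ih =>
      intro p hp
      by_cases hc : c = 'X'
      · simp only [pvSubstLoop, pvSubst, if_pos hc, List.map_cons, List.flatten_cons]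
        rw [ih p.tail (fun b hb => hp b (List.mem_of_mem_tail hb))]
        have hhead : p.headD 0 = 0 ∨ p.headD 0 = 1 := by
          cases p with
          | nil => simp
          | cons q qs => exact hp q (by simp)
        have t0 : (PySem.Int.toStr 0).toList = ['0'] := by decide
        have t1 : (PySem.Int.toStr 1).toList = ['1'] := by decide
        rcases hhead with hh | hh <;> rw [hh] <;> simp [pvPieceStr, t0, t1]
      · simp only [pvSubstLoop, pvSubst, if_neg hc, List.map_cons, List.flatten_cons]
        rw [ih p hp]
        simp [pvPieceStr]
  intro cs p hp
  rw [← String.toList_inj, PySem.Str.toList_join, String.toList_ofList,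
    String.toList_ofList, pvJoin_flatten, key cs p hp]

theorem pvSubst_noX : ∀ (cs : List Char), cs.count 'X' = 0 → ∀ p, pvSubst cs p = cs := by
  intro cs
  induction cs with
  | nil => intro _ _; rfl
  | cons c cs ih =>
    intro h p
    have hc : c ≠ 'X' := by
      intro hc; rw [List.count_cons, if_pos (by simp [hc])] at h; omega
    have ht : cs.count 'X' = 0 := by
      rw [List.count_cons] at h; omega
    simp only [pvSubst, if_neg hc]
    rw [ih ht p]

theorem pvAltRec_eq : ∀ (cs : List Char),
    pvAltRec cs = (List.range (2 ^ cs.count 'X')).map (fun x => pvSubst cs (pvBits (cs.count 'X') x)) := by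
  intro cs
  induction cs with
  | nil => rfl
  | cons c cs ih =>
    by_cases hc : c = 'X'
    · subst hc
      have hcount : ('X' :: cs).count 'X' = cs.count 'X' + 1 := by simp
      rw [hcount]
      have hsplit : (2 : Nat) ^ (cs.count 'X' + 1) = 2 ^ cs.count 'X' + 2 ^ cs.count 'X' := by ring
      rw [hsplit, List.range_add, List.map_append]
      show (pvAltRec cs).map (fun r => '0' :: r) ++ (pvAltRec cs).map (fun r => '1' :: r) = _
      rw [ih, List.map_map, List.map_map, List.map_map]
      congr 1
      · apply List.map_congr_left
        intro x hx
        rw [List.mem_range] at hx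
        simp only [Function.comp]
        rw [pvBits_cons, Nat.div_eq_of_lt hx]
        show '0' :: pvSubst cs (pvBits (cs.count 'X') x) =
          pvSubst ('X' :: cs) ((((0 : Nat) % 2 : Nat) : Int) :: pvBits (cs.count 'X') x)
        simp [pvSubst]
      · apply List.map_congr_left
        intro x hx
        rw [List.mem_range] at hx
        simp only [Function.comp]
        have h2k : 0 < 2 ^ cs.count 'X' := by positivity
        have hd : (2 ^ cs.count 'X' + x) / 2 ^ cs.count 'X' = 1 := by
          rw [Nat.add_comm, Nat.add_div_right _ h2k, Nat.div_eq_of_lt hx]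
        have hb : pvBits (cs.count 'X' + 1) (2 ^ cs.count 'X' + x) =
            (1 : Int) :: pvBits (cs.count 'X') x := by
          rw [pvBits_cons, hd]
          congr 1
          rw [Nat.add_comm, pvBits_add_pow]
        rw [hb]
        show '1' :: pvSubst cs (pvBits (cs.count 'X') x) = pvSubst ('X' :: cs) (1 :: pvBits (cs.count 'X') x)
        simp [pvSubst]
    · have hcount : (c :: cs).count 'X' = cs.count 'X' := by
        simp [hc]
      rw [hcount]
      simp only [pvAltRec]
      rw [if_neg hc, ih, List.map_map]
      apply List.map_congr_left
      intro x _
      simp only [Function.comp]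
      show c :: pvSubst cs (pvBits (cs.count 'X') x) = pvSubst (c :: cs) (pvBits (cs.count 'X') x)
      simp [pvSubst, hc]

theorem pvA_eq (mask : String) :
    gen_mask_perms mask = (List.range (2 ^ mask.toList.count 'X')).map
      (fun x => String.ofList (pvSubst mask.toList (pvBits (mask.toList.count 'X') x))) := by
  have hcnt := pvStrCountX mask
  set k := mask.toList.count 'X' with hk
  have hrange : (PySem.List.pyRange 0 ((2 : Int) ^ (PySem.Str.count mask "X")) 1).map
      (fun x => pvBinCore x.toNat) = (List.range (2 ^ k)).map (fun j => pvBinCore j) := by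
    rw [hcnt, PySem.List.pyRange_one]
    have hcast : (((2 : Int) ^ k) - 0).toNat = 2 ^ k := by
      rw [sub_zero, show ((2 : Int) ^ k) = ((2 ^ k : Nat) : Int) from by push_cast; ring,
        Int.toNat_natCast]
    rw [hcast, List.map_map]
    apply List.map_congr_left
    intro j _
    simp
  have hperms2 : ((PySem.List.pyRange 0 ((2 : Int) ^ (PySem.Str.count mask "X")) 1).map
        (fun x => pvBinCore x.toNat)).map
        (fun perm => perm.map (fun ch => (PySem.Int.ofStr? (String.ofList [ch])).getD 0))
      = (List.range (2 ^ k)).map pvBinInts := by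
    rw [hrange, List.map_map]
    rfl
  show (((((PySem.List.pyRange 0 ((2 : Int) ^ (PySem.Str.count mask "X")) 1).map
      (fun x => pvBinCore x.toNat)).map
      (fun perm => perm.map (fun ch => (PySem.Int.ofStr? (String.ofList [ch])).getD 0))).map
      (fun perm => List.replicate ((pvPyMax (((PySem.List.pyRange 0 ((2 : Int) ^ (PySem.Str.count mask "X")) 1).map
      (fun x => pvBinCore x.toNat)).map
      (fun perm => perm.map (fun ch => (PySem.Int.ofStr? (String.ofList [ch])).getD 0)))).length - perm.length) 0 ++ perm)).foldl
      (fun masks perm => masks ++ [PySem.Str.join "" ((pvSubstLoop mask.toList perm).map pvPieceStr)]) []) = _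
  rw [hperms2, PySem.List.foldl_append_singleton_eq_map]
  simp only [List.nil_append, List.map_map]
  apply List.map_congr_left
  intro x hx
  rw [List.mem_range] at hx
  simp only [Function.comp_apply]
  have hbits : ∀ b ∈ List.replicate ((pvPyMax ((List.range (2 ^ k)).map pvBinInts)).length
      - (pvBinInts x).length) (0 : Int) ++ pvBinInts x, b = 0 ∨ b = 1 := by
    intro b hb
    rcases List.mem_append.mp hb with hb | hb
    · exact Or.inl (List.eq_of_mem_replicate hb)
    · exact pvBinInts_bits x b hb
  rw [pvJoinSubst _ _ hbits]
  rcases Nat.eq_zero_or_pos k with hk0 | hk1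
  · rw [pvSubst_noX mask.toList (hk ▸ hk0), pvSubst_noX mask.toList (hk ▸ hk0)]
  · rw [pvPyMax_eq k hk1, List.length_replicate, pvPad_eq_bits k hk1 x hx]

-- ===== VERDICT (by name: the statement is the Claim_ definition above) =====
theorem gen_mask_perms_spec : Claim_equal_gen_mask_perms := by
  intro mask _
  unfold Spec_gen_mask_perms gen_mask_perms_alt
  rw [pvAltRec_foldl, pvA_eq, pvAltRec_eq, List.map_map]
  rfl
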